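-- pv_equiv track=rewrite | github.com/jieunbyun/tsum | tsum/tsum.py | sum_sorted_tuples_limited
-- ===== SOURCE A (Python) =====
-- import itertools
--
-- def sum_sorted_tuples_limited(max_vals):
--     """
--     Generate all tuples of non-negative integers with len=max_vals,
--     where each element i ≤ max_vals[i],
--     ordered by increasing sum, then lexicographically.
--
--     Args:
--         max_vals (list or tuple): list of maximum values per position.
--
--     Yields:
--         tuple of ints
--     """
--     n = len(max_vals)
--     sum_level = 0
--     while True:
--         found = False
--         for t in itertools.product(*(range(v+1) for v in max_vals)):
--             if sum(t) == sum_level: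
--                 yield t
--                 found = True
--         if not found:
--             break  # no more combinations possible
--         sum_level += 1
-- ===== SOURCE B (Python) =====
-- import itertools
--
-- def sum_sorted_tuples_limited(max_vals):
--     """Bucket tuples by sum in one pass over the product, then yield buckets
--     in increasing-sum order (product order is already lexicographic)."""
--     buckets = {}
--     for t in itertools.product(*(range(v + 1) for v in max_vals)):
--         buckets.setdefault(sum(t), []).append(t)
--     for s in sorted(buckets):
--         yield from buckets[s]
-- ===== Notes on version B (the rewrite author's own statement) =====
-- stated objective: alternative
-- what changed: Instead of re-scanning the whole Cartesian product once per sum level, B makes a single pass over the product, bucketing tuples by their sum in a dict, and then yields the buckets in increasing key order.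
import Mathlib
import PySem

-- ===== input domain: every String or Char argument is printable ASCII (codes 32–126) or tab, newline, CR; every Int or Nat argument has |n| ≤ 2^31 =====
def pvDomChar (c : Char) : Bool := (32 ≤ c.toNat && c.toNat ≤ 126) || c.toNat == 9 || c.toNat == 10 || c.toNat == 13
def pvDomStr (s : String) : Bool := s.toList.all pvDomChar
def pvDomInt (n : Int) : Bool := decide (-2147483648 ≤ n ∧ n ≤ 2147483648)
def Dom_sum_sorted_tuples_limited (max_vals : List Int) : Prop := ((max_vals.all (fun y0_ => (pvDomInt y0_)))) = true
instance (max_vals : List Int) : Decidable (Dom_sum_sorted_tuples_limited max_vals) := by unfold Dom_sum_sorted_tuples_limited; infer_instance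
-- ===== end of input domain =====

-- B replaces A's per-sum-level rescans of the whole Cartesian product by one bucketing pass
-- over the product followed by emitting the buckets in increasing key order (objective: alternative).
-- Both Pythons are generators; equivalence is about the list of yielded tuples.

-- ===== PORT A =====
-- itertools.product(*(range(v+1) for v in max_vals)), rightmost position varying fastest
def pyProduct (mv : List Int) : List (List Int) :=
  match mv with
  | [] => [[]]
  | v :: rest => (PySem.List.pyRange 0 (v + 1) 1).flatMap (fun x => (pyProduct rest).map (fun t => x :: t))

-- the 'while True' loop of A; fuel (max_vals.sum.toNat + 2) only makes it total:
-- the loop always breaks at the first sum level with no tuples, which is ≤ max_vals.sum + 1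
def aLoop (mv : List Int) : Nat → Int → List (List Int)
  | 0, _ => []
  | fuel + 1, sum_level =>
    let here := (pyProduct mv).filter (fun t => t.sum == sum_level)
    if here.isEmpty then [] else here ++ aLoop mv fuel (sum_level + 1)

def sum_sorted_tuples_limited (max_vals : List Int) : List (List Int) :=
  aLoop max_vals (max_vals.sum.toNat + 2) 0

-- ===== PORT B =====
def sum_sorted_tuples_limited_alt (max_vals : List Int) : List (List Int) :=
  let buckets : PySem.Dict Int (List (List Int)) :=
    (pyProduct max_vals).foldl
      (fun d t => d.modify t.sum [] (fun v => v ++ [t])) PySem.Dict.empty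
  (PySem.List.sorted buckets.keys (fun s => s) false).flatMap (fun s => buckets.getD s [])

-- ===== PRECONDITION & SPEC =====
def Spec_sum_sorted_tuples_limited (max_vals : List Int) (out : List (List Int)) : Prop := out = sum_sorted_tuples_limited_alt max_vals
instance (max_vals : List Int) (out : List (List Int)) : Decidable (Spec_sum_sorted_tuples_limited max_vals out) := by unfold Spec_sum_sorted_tuples_limited; infer_instance

-- ===== CLAIM (what is proved, stated in full; the proofs are below) =====
def Claim_equal_sum_sorted_tuples_limited : Prop := ∀ (max_vals : List Int), Dom_sum_sorted_tuples_limited max_vals → Spec_sum_sorted_tuples_limited max_vals (sum_sorted_tuples_limited max_vals)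

-- ===== LEMMAS AND PROOFS =====

-- every tuple of the product has sum between 0 and mv.sum
theorem pyProduct_sum_bounds (mv : List Int) (t : List Int) (ht : t ∈ pyProduct mv) :
    0 ≤ t.sum ∧ t.sum ≤ mv.sum := by
  induction mv generalizing t with
  | nil => simp [pyProduct] at ht; simp [ht]
  | cons v rest ih =>
    simp only [pyProduct, List.mem_flatMap, List.mem_map] at ht
    obtain ⟨x, hx, t', ht', rfl⟩ := ht
    rw [PySem.List.mem_pyRange_one] at hx
    have := ih t' ht'
    simp only [List.sum_cons]
    omega

-- with all bounds nonnegative, every sum 0..mv.sum is achieved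
theorem pyProduct_exists_sum (mv : List Int) (hnn : ∀ v ∈ mv, 0 ≤ v) (s : Int)
    (h0 : 0 ≤ s) (hS : s ≤ mv.sum) : ∃ t ∈ pyProduct mv, t.sum = s := by
  induction mv generalizing s with
  | nil =>
    simp only [List.sum_nil] at hS
    exact ⟨[], by simp [pyProduct], by simp; omega⟩
  | cons v rest ih =>
    have hv : 0 ≤ v := hnn v (by simp)
    have hnn' : ∀ w ∈ rest, 0 ≤ w := fun w hw => hnn w (by simp [hw])
    simp only [List.sum_cons] at hS
    have hr : 0 ≤ rest.sum := List.sum_nonneg hnn'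
    have hmin1 : min v s ≤ v := min_le_left _ _
    have hmin2 : min v s ≤ s := min_le_right _ _
    have hmin3 : 0 ≤ min v s := le_min hv h0
    -- take x = min v s for the first coordinate
    have hle : s - min v s ≤ rest.sum := by
      rcases le_total v s with h | h
      · rw [min_eq_left h]; omega
      · rw [min_eq_right h]; omega
    obtain ⟨t', ht', hts⟩ := ih hnn' (s - min v s) (by omega) hle
    refine ⟨min v s :: t', ?_, by simp [List.sum_cons, hts]⟩
    simp only [pyProduct, List.mem_flatMap, List.mem_map]
    exact ⟨min v s, by rw [PySem.List.mem_pyRange_one]; omega, t', ht', rfl⟩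

-- a negative bound empties the product
theorem pyProduct_eq_nil (mv : List Int) (h : ¬ ∀ v ∈ mv, 0 ≤ v) : pyProduct mv = [] := by
  induction mv with
  | nil => exact absurd (by simp) h
  | cons v rest ih =>
    by_cases hv : 0 ≤ v
    · have hrest : ¬ ∀ w ∈ rest, 0 ≤ w := fun hall => h (fun w hw => by
        rcases List.mem_cons.mp hw with rfl | hw'
        · exact hv
        · exact hall w hw')
      simp [pyProduct, ih hrest]
    · have : PySem.List.pyRange 0 (v + 1) 1 = [] :=
        PySem.List.pyRange_one_eq_nil (by omega)
      simp [pyProduct, this]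

theorem aLoop_eq_flatMap (mv : List Int) (hnn : ∀ v ∈ mv, 0 ≤ v) (d : Nat)
    (hd : (d : Int) ≤ mv.sum + 1) : ∀ fuel : Nat, d + 1 ≤ fuel →
    aLoop mv fuel (mv.sum + 1 - (d : Int)) =
      (PySem.List.pyRange (mv.sum + 1 - (d : Int)) (mv.sum + 1) 1).flatMap
        (fun s => (pyProduct mv).filter (fun t => t.sum == s)) := by
  induction d with
  | zero =>
    intro fuel hf
    obtain ⟨f, rfl⟩ : ∃ f, fuel = f + 1 := ⟨fuel - 1, by omega⟩
    have hemp : (pyProduct mv).filter (fun t => t.sum == (mv.sum + 1 - ((0 : Nat) : Int))) = [] := by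
      rw [List.filter_eq_nil_iff]
      intro t ht
      have := pyProduct_sum_bounds mv t ht
      simp only [beq_iff_eq]
      omega
    rw [aLoop]
    simp only [hemp, List.isEmpty_nil, if_true]
    rw [PySem.List.pyRange_one_eq_nil (by omega)]
    simp
  | succ d ih =>
    intro fuel hf
    obtain ⟨f, rfl⟩ : ∃ f, fuel = f + 1 := ⟨fuel - 1, by omega⟩
    have hlev : (0 : Int) ≤ mv.sum + 1 - ((d + 1 : Nat) : Int) ∧
        mv.sum + 1 - ((d + 1 : Nat) : Int) ≤ mv.sum := by push_cast; push_cast at hd; omega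
    obtain ⟨t, ht, hts⟩ := pyProduct_exists_sum mv hnn _ hlev.1 hlev.2
    have hne : (pyProduct mv).filter (fun t => t.sum == (mv.sum + 1 - ((d + 1 : Nat) : Int))) ≠ [] := by
      intro hcon
      have := List.filter_eq_nil_iff.mp hcon t ht
      simp [hts] at this
    rw [aLoop]
    simp only [List.isEmpty_iff]
    rw [if_neg hne]
    have hstep : mv.sum + 1 - ((d + 1 : Nat) : Int) + 1 = mv.sum + 1 - (d : Int) := by
      push_cast; ring
    rw [PySem.List.pyRange_one_cons
      (show mv.sum + 1 - ((d + 1 : Nat) : Int) < mv.sum + 1 by push_cast; omega),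
      List.flatMap_cons]
    congr 1
    rw [hstep, ih (by push_cast at hd ⊢; omega) f (by omega)]

theorem buckets_getD (mv : List Int) (s : Int) :
    ((pyProduct mv).foldl (fun d t => d.modify t.sum [] (fun v => v ++ [t]))
      (PySem.Dict.empty : PySem.Dict Int (List (List Int)))).getD s [] =
      (pyProduct mv).filter (fun t => t.sum == s) := by
  have h := PySem.Dict.getD_foldl_modify_append
    (l := (pyProduct mv).map (fun t => (t.sum, t)))
    (d := (PySem.Dict.empty : PySem.Dict Int (List (List Int)))) (c := s)
  rw [List.foldl_map] at h
  simp only [PySem.Dict.getD_empty, List.nil_append] at h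
  rw [h, List.filter_map]
  simp only [Function.comp_def]
  rw [List.map_map]
  simp [Function.comp_def]

theorem buckets_keys (mv : List Int) :
    ((pyProduct mv).foldl (fun d t => d.modify t.sum [] (fun v => v ++ [t]))
      (PySem.Dict.empty : PySem.Dict Int (List (List Int)))).keys =
      PySem.Set.ofList ((pyProduct mv).map List.sum) := by
  rw [PySem.Dict.keys_foldl_modify_key]
  simp [PySem.Set.update_nil_left, PySem.Dict.keys_empty]

-- ===== VERDICT (by name: the statement is the Claim_ definition above) =====
theorem sorted_keys_eq (mv : List Int) (hnn : ∀ v ∈ mv, 0 ≤ v) :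
    PySem.List.sorted (PySem.Set.ofList ((pyProduct mv).map List.sum)) (fun s => s) false =
      PySem.List.pyRange 0 (mv.sum + 1) 1 := by
  apply PySem.List.sorted_eq_of_perm_of_pairwise_lt
  · rw [List.perm_ext_iff_of_nodup (PySem.List.nodup_pyRange_one _ _) (PySem.Set.nodup_ofList _)]
    intro x
    rw [PySem.List.mem_pyRange_one, PySem.Set.mem_ofList, List.mem_map]
    constructor
    · rintro ⟨hx0, hx1⟩
      obtain ⟨t, ht, hts⟩ := pyProduct_exists_sum mv hnn x hx0 (by omega)
      exact ⟨t, ht, hts⟩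
    · rintro ⟨t, ht, rfl⟩
      have := pyProduct_sum_bounds mv t ht
      omega
  · exact PySem.List.pairwise_lt_pyRange_one _ _

theorem sum_sorted_tuples_limited_spec : Claim_equal_sum_sorted_tuples_limited := by
  intro mv _
  unfold Spec_sum_sorted_tuples_limited sum_sorted_tuples_limited sum_sorted_tuples_limited_alt
  by_cases hnn : ∀ v ∈ mv, 0 ≤ v
  · have hS : 0 ≤ mv.sum := List.sum_nonneg hnn
    have h0 : mv.sum + 1 - ((mv.sum.toNat + 1 : Nat) : Int) = 0 := by push_cast; omega
    have hA : aLoop mv (mv.sum.toNat + 2) 0 =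
        (PySem.List.pyRange 0 (mv.sum + 1) 1).flatMap
          (fun s => (pyProduct mv).filter (fun t => t.sum == s)) := by
      rw [← h0]
      exact aLoop_eq_flatMap mv hnn (mv.sum.toNat + 1) (by push_cast; omega)
        (mv.sum.toNat + 2) (by omega)
    rw [hA]
    simp only [buckets_keys, sorted_keys_eq mv hnn, buckets_getD]
  · have hP : pyProduct mv = [] := pyProduct_eq_nil mv hnn
    rw [aLoop]
    simp [hP, PySem.Dict.keys_empty]
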